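-- pv_equiv track=rewrite | github.com/shwetamazumder/solace-agent-mesh | src/common/utils.py | match_solace_topic
-- ===== SOURCE A (Python) =====
-- def match_solace_topic_level(pattern: str, topic_level: str) -> bool:
--     """Match a single topic level with potential * wildcard prefix matching"""
--     if pattern == "*":
--         return True
--     if pattern.endswith("*"):
--         return topic_level.startswith(pattern[:-1])
--     return pattern == topic_level
--
-- def match_solace_topic(subscription: str, topic: str) -> bool:
--     """
--     Match a Solace topic against a subscription pattern.
--     Handles * for prefix matching within a level and > for matching one or more levels.
--     Case sensitive matching.
--
--     Examples:
--         match_solace_topic("a/b*/c", "a/bob/c") -> True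
--         match_solace_topic("a/*/c", "a/b/c") -> True
--         match_solace_topic("a/>", "a/b") -> True
--         match_solace_topic("a/>", "a/b/c") -> True
--         match_solace_topic("a/>", "a") -> False
--     """
--     if not subscription or not topic:
--         return False
--
--     sub_levels = subscription.split("/")
--     topic_levels = topic.split("/")
--
--     # Handle > wildcard
--     if sub_levels[-1] == ">":
--         # > must match at least one level
--         if len(topic_levels) <= len(sub_levels) - 1:
--             return False
--         # Match all levels before the >
--         return all(
--             match_solace_topic_level(sub_levels[i], topic_levels[i])
--             for i in range(len(sub_levels) - 1)
--         )
--
--     # Without >, levels must match exactly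
--     if len(sub_levels) != len(topic_levels):
--         return False
--
--     # Match each level
--     return all(
--         match_solace_topic_level(sub_levels[i], topic_levels[i])
--         for i in range(len(sub_levels))
--     )
-- ===== SOURCE B (Python) =====
-- def _match_level(pattern: str, topic_level: str) -> bool:
--     if pattern == "*":
--         return True
--     if pattern.endswith("*"):
--         return topic_level.startswith(pattern[:-1])
--     return pattern == topic_level
--
-- def match_solace_topic(subscription: str, topic: str) -> bool:
--     if not subscription or not topic:
--         return False
--     def rec(subs, tops):
--         if subs == [">"]:
--             return len(tops) >= 1
--         if not subs or not tops:
--             return not subs and not tops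
--         return _match_level(subs[0], tops[0]) and rec(subs[1:], tops[1:])
--     return rec(subscription.split("/"), topic.split("/"))
-- ===== Notes on version B (the rewrite author's own statement) =====
-- stated objective: alternative
-- what changed: Replaced the length-case analysis with index loops over range() by a single recursive matcher over the two split level lists, where '>' is handled only by the subs == ['>'] base case and length mismatches fail naturally as one list empties.
import Mathlib
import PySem

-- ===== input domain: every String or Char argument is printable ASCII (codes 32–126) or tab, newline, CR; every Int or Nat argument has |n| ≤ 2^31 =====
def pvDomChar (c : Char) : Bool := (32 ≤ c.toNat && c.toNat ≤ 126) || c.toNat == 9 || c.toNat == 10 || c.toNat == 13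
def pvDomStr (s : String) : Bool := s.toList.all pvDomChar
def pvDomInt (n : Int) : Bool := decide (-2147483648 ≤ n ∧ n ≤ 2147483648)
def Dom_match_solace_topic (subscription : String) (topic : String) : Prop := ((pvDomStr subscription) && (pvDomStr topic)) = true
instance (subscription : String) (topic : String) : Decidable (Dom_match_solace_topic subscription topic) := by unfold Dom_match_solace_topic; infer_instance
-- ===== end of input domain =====

-- B re-implements the index-and-length-case matcher as a single structural recursion over the
-- split level lists (objective: alternative decomposition, same cost); return values only, no side effects.

-- shared by both Pythons: s.split("/")  (sep is the nonempty literal "/", so Python never raises)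
def pySplitSlash (s : String) : List String :=
  (PySem.Chars.splitOn s.toList ['/']).map String.ofList

-- ===== PORT A =====
-- helper match_solace_topic_level, used verbatim by both Pythons (Source B's _match_level is the same code)
def match_solace_topic_level (pattern : String) (topic_level : String) : Bool :=
  if pattern == "*" then true
  else if PySem.Str.endswith pattern "*" then
    PySem.Str.startswith topic_level (PySem.Str.slice pattern none (some (-1)))   -- pattern[:-1]
  else pattern == topic_level

def match_solace_topic (subscription : String) (topic : String) : Bool :=
  if subscription == "" || topic == "" then false
  else
    let sub_levels := pySplitSlash subscription
    let topic_levels := pySplitSlash topic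
    -- sub_levels[-1]: split of a string is never empty, so getLast? is exact here
    if sub_levels.getLast? == some ">" then
      if topic_levels.length ≤ sub_levels.length - 1 then false
      else (List.range (sub_levels.length - 1)).all
        (fun i => match_solace_topic_level (sub_levels.getD i "") (topic_levels.getD i ""))
    else if sub_levels.length != topic_levels.length then false
    else (List.range sub_levels.length).all
      (fun i => match_solace_topic_level (sub_levels.getD i "") (topic_levels.getD i ""))

-- ===== PORT B =====
-- Source B's inner rec(subs, tops)
def pvRec : List String → List String → Bool
  | subs, tops =>
    if subs == [">"] then decide (1 ≤ tops.length)
    else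
      match subs, tops with
      | [], [] => true
      | [], _ :: _ => false
      | _ :: _, [] => false
      | s :: ss, t :: ts => match_solace_topic_level s t && pvRec ss ts

def match_solace_topic_alt (subscription : String) (topic : String) : Bool :=
  if subscription == "" || topic == "" then false
  else pvRec (pySplitSlash subscription) (pySplitSlash topic)

-- ===== PRECONDITION & SPEC =====
def Spec_match_solace_topic (subscription : String) (topic : String) (out : Bool) : Prop := out = match_solace_topic_alt subscription topic
instance (subscription : String) (topic : String) (out : Bool) : Decidable (Spec_match_solace_topic subscription topic out) := by unfold Spec_match_solace_topic; infer_instance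

-- ===== CLAIM (what is proved, stated in full; the proofs are below) =====
def Claim_equal_match_solace_topic : Prop := ∀ (subscription : String) (topic : String), Dom_match_solace_topic subscription topic → Spec_match_solace_topic subscription topic (match_solace_topic subscription topic)

-- ===== LEMMAS AND PROOFS =====

-- the part of A after the guard, abstracted over the two level lists
def aCore (subs tops : List String) : Bool :=
  if subs.getLast? == some ">" then
    if tops.length ≤ subs.length - 1 then false
    else (List.range (subs.length - 1)).all
      (fun i => match_solace_topic_level (subs.getD i "") (tops.getD i ""))
  else if subs.length != tops.length then false
  else (List.range subs.length).all
    (fun i => match_solace_topic_level (subs.getD i "") (tops.getD i ""))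

lemma splitOn_go_ne_nil (sep : List Char) (fuel : Nat) (l cur : List Char)
    (acc : List (List Char)) : PySem.Chars.splitOn.go sep fuel l cur acc ≠ [] := by
  induction fuel generalizing l cur acc with
  | zero => simp [PySem.Chars.splitOn.go]
  | succ n ih =>
    cases l with
    | nil => simp [PySem.Chars.splitOn.go]
    | cons c rest =>
      rw [PySem.Chars.splitOn.go]
      split
      · exact ih _ _ _
      · exact ih _ _ _

lemma pySplitSlash_ne_nil (s : String) : pySplitSlash s ≠ [] := by
  unfold pySplitSlash PySem.Chars.splitOn
  simp only [ne_eq, List.map_eq_nil_iff]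
  exact splitOn_go_ne_nil _ _ _ _ _

lemma rangeAll_cons (g : String → String → Bool) (x y : String) (xs ys : List String) (k : Nat) :
    (List.range (k + 1)).all (fun i => g ((x :: xs).getD i "") ((y :: ys).getD i ""))
      = (g x y && (List.range k).all (fun i => g (xs.getD i "") (ys.getD i ""))) := by
  simp [List.range_succ_eq_map, List.all_map, Function.comp_def]

lemma pvRec_nil_right (a : String) (l : List String) : pvRec (a :: l) [] = false := by
  rw [pvRec]
  split
  · simp
  · rfl

lemma core_eq (subs tops : List String) (hs : subs ≠ []) (ht : tops ≠ []) :
    aCore subs tops = pvRec subs tops := by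
  induction subs generalizing tops with
  | nil => exact absurd rfl hs
  | cons a subs' ih =>
    cases tops with
    | nil => exact absurd rfl ht
    | cons t ts =>
      cases subs' with
      | nil =>
        -- subs = [a]
        rw [pvRec, aCore]
        by_cases ha : a = ">"
        · subst ha
          simp [List.getLast?]
        · have hbeq : ([a] == [">"]) = false := by
            simp [ha]
          rw [hbeq]
          simp only [List.getLast?_singleton, beq_iff_eq, Option.some.injEq, if_neg ha]
          cases ts with
          | nil => simp [pvRec]
          | cons u us => simp [pvRec]
      | cons b ss =>
        -- subs = a :: b :: ss, length ≥ 2, so subs ≠ [">"]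
        have hbeq : ((a :: b :: ss) == [">"]) = false := by
          simp
        rw [pvRec, hbeq]
        simp only [Bool.false_eq_true, if_false]
        rw [aCore]
        cases ts with
        | nil =>
          -- topic has one level, subscription at least two: A is false on both branches
          rw [pvRec_nil_right]
          simp only [List.getLast?_cons_cons]
          split
          · simp only [List.length_cons, List.length_nil]
            rw [if_pos (show 0 + 1 ≤ ss.length + 1 + 1 - 1 by omega)]
            simp
          · have hc : ((ss.length + 1 + 1 != 0 + 1) = true) := by
              simp only [bne_iff_ne, ne_eq]; omega
            simp only [List.length_cons, List.length_nil]
            rw [hc]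
            simp
        | cons u us =>
          have ihe := ih (u :: us) (by simp) (by simp)
          rw [← ihe, aCore]
          simp only [List.getLast?_cons_cons, List.length_cons]
          split
          · -- '>' branch
            by_cases hle : us.length + 1 + 1 ≤ ss.length + 1 + 1 - 1
            · rw [if_pos hle, if_pos (show us.length + 1 ≤ ss.length + 1 - 1 by omega)]
              simp
            · rw [if_neg hle, if_neg (show ¬ us.length + 1 ≤ ss.length + 1 - 1 by omega)]
              rw [show ss.length + 1 + 1 - 1 = (ss.length + 1 - 1) + 1 by omega, rangeAll_cons]
          · -- exact-length branch
            by_cases hne : ss.length = us.length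
            · have h1 : ((ss.length + 1 + 1 != us.length + 1 + 1) = false) := by
                simp [hne]
              have h2 : ((ss.length + 1 != us.length + 1) = false) := by
                simp [hne]
              rw [h1, h2]
              simp only [Bool.false_eq_true, if_false]
              rw [show ss.length + 1 + 1 = (ss.length + 1) + 1 from rfl, rangeAll_cons]
            · have h1 : ((ss.length + 1 + 1 != us.length + 1 + 1) = true) := by
                simp only [bne_iff_ne, ne_eq]; omega
              have h2 : ((ss.length + 1 != us.length + 1) = true) := by
                simp only [bne_iff_ne, ne_eq]; omega
              rw [h1, h2]
              simp

-- ===== VERDICT (by name: the statement is the Claim_ definition above) =====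
theorem match_solace_topic_spec : Claim_equal_match_solace_topic := by
  intro subscription topic _
  unfold Spec_match_solace_topic match_solace_topic match_solace_topic_alt
  split
  · rfl
  · exact core_eq _ _ (pySplitSlash_ne_nil _) (pySplitSlash_ne_nil _)
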